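-- pv_equiv track=rewrite | github.com/gudise/thesis | myfpga/interfaz_pcps.py | bytestr_to_bitstr
-- ===== SOURCE A (Python) =====
-- def bytestr_to_bitstr(bytestr, bitstr_width):
--     """Esta función toma una lista de bytes `bytestr` y los aloja en una lista de bits de tamaño `bitstr_width`. Si `bitstr_width` es insuficiente, la lista de bits se truncará.
--
--     Parameters
--     ----------
--     bytestr : lista de u8
--         Lista de enteros entre 0 y 255 (bytes).
--     bitstr_width : int
--         Tamaño de la lista de bits resultante.
--
--     Returns
--     -------
--     lista de {0,1}
--         Lista de bits.
--     """
--     bitstr_aux=[]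
--     for i in range(8*len(bytestr)):
--         bitstr_aux.append(0)
--
--     j=0
--     for i in bytestr:
--         aux = i
--         bitstr_aux[j] = aux%2
--
--         aux = aux//2
--         bitstr_aux[j+1] = aux%2
--
--         aux = aux//2
--         bitstr_aux[j+2] = aux%2
--
--         aux = aux//2
--         bitstr_aux[j+3] = aux%2
--
--         aux = aux//2
--         bitstr_aux[j+4] = aux%2
--
--         aux = aux//2
--         bitstr_aux[j+5] = aux%2
--
--         aux = aux//2
--         bitstr_aux[j+6] = aux%2
--
--         aux = aux//2
--         bitstr_aux[j+7] = aux%2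
--
--         j = j+8
--
--     result=[]
--     for i in range(bitstr_width):
--         if i < len(bitstr_aux):
--             result.append(bitstr_aux[i])
--         else:
--             result.append(0)
--
--     return result
-- ===== SOURCE B (Python) =====
-- def bytestr_to_bitstr(bytestr, bitstr_width):
--     """Single output-indexed pass: bit i of the result is bit i%8 of byte i//8."""
--     result = []
--     for i in range(bitstr_width):
--         b = i // 8
--         if b < len(bytestr):
--             result.append((bytestr[b] >> (i % 8)) & 1)
--         else:
--             result.append(0)
--     return result
-- ===== Notes on version B (the rewrite author's own statement) =====
-- stated objective: faster
-- what changed: A builds an 8*len(bytestr) intermediate bit buffer with eight unrolled indexed assignments per byte and then copies/pads it in a second loop; B drops the buffer and builds the result in one output-indexed pass, computing bit i directly as (bytestr[i//8] >> (i%8)) & 1.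
import Mathlib
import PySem

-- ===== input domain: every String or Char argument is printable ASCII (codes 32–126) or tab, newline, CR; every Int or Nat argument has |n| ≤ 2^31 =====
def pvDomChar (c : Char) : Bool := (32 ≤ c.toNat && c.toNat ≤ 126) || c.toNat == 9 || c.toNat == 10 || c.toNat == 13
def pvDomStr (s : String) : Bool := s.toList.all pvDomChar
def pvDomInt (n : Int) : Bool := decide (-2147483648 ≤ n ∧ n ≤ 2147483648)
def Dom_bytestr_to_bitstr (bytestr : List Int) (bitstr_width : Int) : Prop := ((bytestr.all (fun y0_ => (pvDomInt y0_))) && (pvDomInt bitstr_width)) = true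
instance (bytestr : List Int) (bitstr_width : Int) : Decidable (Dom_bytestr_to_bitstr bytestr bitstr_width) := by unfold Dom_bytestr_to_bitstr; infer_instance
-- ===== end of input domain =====

-- B fuses A's two-phase build-then-copy into one output-indexed pass (bit i = bit i%8 of byte i//8), skipping the intermediate bit buffer; measured faster in a timing run.

-- ===== PORT A =====
-- the body of A's per-byte loop: eight indexed assignments, then j += 8
def pvStepA (st : List Int × Int) (i : Int) : List Int × Int :=
  let aux := i
  let buf := PySem.List.pySetD st.1 st.2 (PySem.Int.mod aux 2)
  let aux := PySem.Int.floordiv aux 2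
  let buf := PySem.List.pySetD buf (st.2 + 1) (PySem.Int.mod aux 2)
  let aux := PySem.Int.floordiv aux 2
  let buf := PySem.List.pySetD buf (st.2 + 2) (PySem.Int.mod aux 2)
  let aux := PySem.Int.floordiv aux 2
  let buf := PySem.List.pySetD buf (st.2 + 3) (PySem.Int.mod aux 2)
  let aux := PySem.Int.floordiv aux 2
  let buf := PySem.List.pySetD buf (st.2 + 4) (PySem.Int.mod aux 2)
  let aux := PySem.Int.floordiv aux 2
  let buf := PySem.List.pySetD buf (st.2 + 5) (PySem.Int.mod aux 2)
  let aux := PySem.Int.floordiv aux 2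
  let buf := PySem.List.pySetD buf (st.2 + 6) (PySem.Int.mod aux 2)
  let aux := PySem.Int.floordiv aux 2
  let buf := PySem.List.pySetD buf (st.2 + 7) (PySem.Int.mod aux 2)
  (buf, st.2 + 8)

def bytestr_to_bitstr (bytestr : List Int) (bitstr_width : Int) : List Int :=
  -- bitstr_aux = [] ; for i in range(8*len(bytestr)): bitstr_aux.append(0)
  let bitstr_aux0 :=
    (PySem.List.pyRange 0 (8 * (bytestr.length : Int)) 1).foldl
      (fun acc _ => acc ++ [(0 : Int)]) []
  -- j = 0 ; for i in bytestr: the eight assignments of pvStepA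
  let st := bytestr.foldl pvStepA (bitstr_aux0, (0 : Int))
  -- result loop
  (PySem.List.pyRange 0 bitstr_width 1).foldl
    (fun acc i =>
      if i < (st.1.length : Int) then acc ++ [PySem.List.pyGetD st.1 i 0]
      else acc ++ [(0 : Int)])
    []

-- ===== PORT B =====
-- Python's `(x >> k) & 1` for k >= 0 is exactly floordiv x 2^k, then mod 2 (arithmetic shift, two's complement).
def bytestr_to_bitstr_alt (bytestr : List Int) (bitstr_width : Int) : List Int :=
  (PySem.List.pyRange 0 bitstr_width 1).foldl
    (fun result i =>
      let b := PySem.Int.floordiv i 8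
      if b < (bytestr.length : Int) then
        result ++ [PySem.Int.mod
          (PySem.Int.floordiv (PySem.List.pyGetD bytestr b 0)
            (2 ^ (PySem.Int.mod i 8).toNat)) 2]
      else result ++ [(0 : Int)])
    []

-- ===== PRECONDITION & SPEC =====
def Spec_bytestr_to_bitstr (bytestr : List Int) (bitstr_width : Int) (out : List Int) : Prop := out = bytestr_to_bitstr_alt bytestr bitstr_width
instance (bytestr : List Int) (bitstr_width : Int) (out : List Int) : Decidable (Spec_bytestr_to_bitstr bytestr bitstr_width out) := by unfold Spec_bytestr_to_bitstr; infer_instance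

-- ===== CLAIM (what is proved, stated in full; the proofs are below) =====
def Claim_equal_bytestr_to_bitstr : Prop := ∀ (bytestr : List Int) (bitstr_width : Int), Dom_bytestr_to_bitstr bytestr bitstr_width → Spec_bytestr_to_bitstr bytestr bitstr_width (bytestr_to_bitstr bytestr bitstr_width)

-- ===== LEMMAS AND PROOFS =====

-- the eight bits A writes for one byte, in order
def pvBits8 (i : Int) : List Int :=
  [PySem.Int.mod i 2,
   PySem.Int.mod (PySem.Int.floordiv i 2) 2,
   PySem.Int.mod (PySem.Int.floordiv (PySem.Int.floordiv i 2) 2) 2,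
   PySem.Int.mod (PySem.Int.floordiv (PySem.Int.floordiv (PySem.Int.floordiv i 2) 2) 2) 2,
   PySem.Int.mod (PySem.Int.floordiv (PySem.Int.floordiv (PySem.Int.floordiv (PySem.Int.floordiv i 2) 2) 2) 2) 2,
   PySem.Int.mod (PySem.Int.floordiv (PySem.Int.floordiv (PySem.Int.floordiv (PySem.Int.floordiv (PySem.Int.floordiv i 2) 2) 2) 2) 2) 2,
   PySem.Int.mod (PySem.Int.floordiv (PySem.Int.floordiv (PySem.Int.floordiv (PySem.Int.floordiv (PySem.Int.floordiv (PySem.Int.floordiv i 2) 2) 2) 2) 2) 2) 2,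
   PySem.Int.mod (PySem.Int.floordiv (PySem.Int.floordiv (PySem.Int.floordiv (PySem.Int.floordiv (PySem.Int.floordiv (PySem.Int.floordiv (PySem.Int.floordiv i 2) 2) 2) 2) 2) 2) 2) 2]

theorem pvBits8_length (i : Int) : (pvBits8 i).length = 8 := rfl

-- set in the middle of an append, Int index
theorem pv_set_mid (pre ys : List Int) (c : Nat) (v : Int) :
    PySem.List.pySetD (pre ++ ys) ((pre.length : Int) + (c : Int)) v = pre ++ ys.set c v := by
  have h : ((pre.length : Int) + (c : Int)) = ((pre.length + c : Nat) : Int) := by push_cast; ring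
  rw [h, PySem.List.pySetD_natCast, List.set_append_right _ _ (by omega),
    Nat.add_sub_cancel_left]

theorem pv_set_0 (pre : List Int) (a0 a1 a2 a3 a4 a5 a6 a7 : Int) (rest : List Int) (v : Int) :
    PySem.List.pySetD (pre ++ (a0::a1::a2::a3::a4::a5::a6::a7::rest)) ((pre.length : Int)) v
      = pre ++ (v::a1::a2::a3::a4::a5::a6::a7::rest) := by
  have h := pv_set_mid pre (a0::a1::a2::a3::a4::a5::a6::a7::rest) 0 v
  simp only [Nat.cast_zero, add_zero, List.set_cons_zero] at h
  exact h

theorem pv_set_1 (pre : List Int) (a0 a1 a2 a3 a4 a5 a6 a7 : Int) (rest : List Int) (v : Int) :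
    PySem.List.pySetD (pre ++ (a0::a1::a2::a3::a4::a5::a6::a7::rest)) ((pre.length : Int) + 1) v
      = pre ++ (a0::v::a2::a3::a4::a5::a6::a7::rest) := by
  simpa using pv_set_mid pre (a0::a1::a2::a3::a4::a5::a6::a7::rest) 1 v

theorem pv_set_2 (pre : List Int) (a0 a1 a2 a3 a4 a5 a6 a7 : Int) (rest : List Int) (v : Int) :
    PySem.List.pySetD (pre ++ (a0::a1::a2::a3::a4::a5::a6::a7::rest)) ((pre.length : Int) + 2) v
      = pre ++ (a0::a1::v::a3::a4::a5::a6::a7::rest) := by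
  simpa using pv_set_mid pre (a0::a1::a2::a3::a4::a5::a6::a7::rest) 2 v

theorem pv_set_3 (pre : List Int) (a0 a1 a2 a3 a4 a5 a6 a7 : Int) (rest : List Int) (v : Int) :
    PySem.List.pySetD (pre ++ (a0::a1::a2::a3::a4::a5::a6::a7::rest)) ((pre.length : Int) + 3) v
      = pre ++ (a0::a1::a2::v::a4::a5::a6::a7::rest) := by
  simpa using pv_set_mid pre (a0::a1::a2::a3::a4::a5::a6::a7::rest) 3 v

theorem pv_set_4 (pre : List Int) (a0 a1 a2 a3 a4 a5 a6 a7 : Int) (rest : List Int) (v : Int) :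
    PySem.List.pySetD (pre ++ (a0::a1::a2::a3::a4::a5::a6::a7::rest)) ((pre.length : Int) + 4) v
      = pre ++ (a0::a1::a2::a3::v::a5::a6::a7::rest) := by
  simpa using pv_set_mid pre (a0::a1::a2::a3::a4::a5::a6::a7::rest) 4 v

theorem pv_set_5 (pre : List Int) (a0 a1 a2 a3 a4 a5 a6 a7 : Int) (rest : List Int) (v : Int) :
    PySem.List.pySetD (pre ++ (a0::a1::a2::a3::a4::a5::a6::a7::rest)) ((pre.length : Int) + 5) v
      = pre ++ (a0::a1::a2::a3::a4::v::a6::a7::rest) := by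
  simpa using pv_set_mid pre (a0::a1::a2::a3::a4::a5::a6::a7::rest) 5 v

theorem pv_set_6 (pre : List Int) (a0 a1 a2 a3 a4 a5 a6 a7 : Int) (rest : List Int) (v : Int) :
    PySem.List.pySetD (pre ++ (a0::a1::a2::a3::a4::a5::a6::a7::rest)) ((pre.length : Int) + 6) v
      = pre ++ (a0::a1::a2::a3::a4::a5::v::a7::rest) := by
  simpa using pv_set_mid pre (a0::a1::a2::a3::a4::a5::a6::a7::rest) 6 v

theorem pv_set_7 (pre : List Int) (a0 a1 a2 a3 a4 a5 a6 a7 : Int) (rest : List Int) (v : Int) :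
    PySem.List.pySetD (pre ++ (a0::a1::a2::a3::a4::a5::a6::a7::rest)) ((pre.length : Int) + 7) v
      = pre ++ (a0::a1::a2::a3::a4::a5::a6::v::rest) := by
  simpa using pv_set_mid pre (a0::a1::a2::a3::a4::a5::a6::a7::rest) 7 v

-- one pass of A's per-byte loop body over a buffer pre ++ 0^8 ++ rest
theorem pv_step_eq (pre rest : List Int) (x : Int) :
    pvStepA (pre ++ ((0:Int) :: 0 :: 0 :: 0 :: 0 :: 0 :: 0 :: 0 :: rest), (pre.length : Int)) x
      = (pre ++ (pvBits8 x ++ rest), (pre.length : Int) + 8) := by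
  simp only [pvStepA, pv_set_0, pv_set_1, pv_set_2, pv_set_3, pv_set_4, pv_set_5, pv_set_6,
    pv_set_7, pvBits8, List.cons_append, List.nil_append]

-- A's per-byte loop turns the zero buffer into the flatMap of pvBits8
theorem pv_loop_eq (l pre : List Int) :
    l.foldl pvStepA (pre ++ List.replicate (8 * l.length) 0, (pre.length : Int))
      = (pre ++ l.flatMap pvBits8, (pre.length : Int) + 8 * l.length) := by
  induction l generalizing pre with
  | nil => simp
  | cons x t ih =>
    have hrep : List.replicate (8 * (x :: t).length) (0 : Int)
        = (0:Int) :: 0 :: 0 :: 0 :: 0 :: 0 :: 0 :: 0 :: List.replicate (8 * t.length) 0 := by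
      have h : 8 * (x :: t).length = 8 + 8 * t.length := by simp; ring
      rw [h, List.replicate_add]
      rfl
    rw [hrep, List.foldl_cons, pv_step_eq pre (List.replicate (8 * t.length) 0) x]
    have h2 : (pre.length : Int) + 8 = (((pre ++ pvBits8 x).length : Nat) : Int) := by
      simp [pvBits8]
    rw [show pre ++ (pvBits8 x ++ List.replicate (8 * t.length) 0)
          = (pre ++ pvBits8 x) ++ List.replicate (8 * t.length) 0 by simp, h2,
      ih (pre ++ pvBits8 x)]
    simp only [Prod.mk.injEq]
    refine ⟨by simp, by simp [pvBits8]; ring⟩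

-- indexing the flattened bit list
theorem pv_flat_getD (l : List Int) (k : Nat) (hk : k / 8 < l.length) :
    (l.flatMap pvBits8).getD k 0
      = PySem.Int.mod (PySem.Int.floordiv (l.getD (k / 8) 0) (2 ^ (k % 8))) 2 := by
  induction l generalizing k with
  | nil => simp at hk
  | cons x t ih =>
    have hl : (x :: t).length = t.length + 1 := rfl
    by_cases h8 : k < 8
    · rw [List.flatMap_cons, List.getD_append _ _ _ _ (by rw [pvBits8_length]; omega)]
      have hq : k / 8 = 0 := by omega
      have hr : k % 8 = k := by omega
      rw [hq, hr, List.getD_cons_zero]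
      interval_cases k <;>
        simp [pvBits8, List.getD, PySem.Int.floordiv_eq_ediv_of_pos,
          PySem.Int.mod_eq_emod_of_pos] <;> omega
    · rw [List.flatMap_cons, List.getD_append_right _ _ _ _ (by rw [pvBits8_length]; omega),
        pvBits8_length]
      have hq : k / 8 = (k - 8) / 8 + 1 := by omega
      have hr : k % 8 = (k - 8) % 8 := by omega
      rw [hq, hr, List.getD_cons_succ]
      exact ih (k - 8) (by omega)

-- length of the flattened bit list
theorem pv_flat_length (l : List Int) : (l.flatMap pvBits8).length = 8 * l.length := by
  induction l with
  | nil => simp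
  | cons x t ih =>
    simp [List.flatMap_cons, ih, pvBits8]
    ring

-- value of output position k, A's form (read from the flattened buffer) vs B's form (divmod addressing)
theorem pv_point (l : List Int) (k : Nat) :
    (if (k : Int) < (((l.flatMap pvBits8).length : Nat) : Int)
      then PySem.List.pyGetD (l.flatMap pvBits8) (k : Int) 0 else 0)
    = (if PySem.Int.floordiv (k : Int) 8 < ((l.length : Nat) : Int)
      then PySem.Int.mod
        (PySem.Int.floordiv (PySem.List.pyGetD l (PySem.Int.floordiv (k : Int) 8) 0)
          (2 ^ (PySem.Int.mod (k : Int) 8).toNat)) 2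
      else 0) := by
  have hfd : PySem.Int.floordiv (k : Int) 8 = ((k / 8 : Nat) : Int) := by
    rw [PySem.Int.floordiv_eq_ediv_of_pos (by norm_num)]
    omega
  have hmd : PySem.Int.mod (k : Int) 8 = ((k % 8 : Nat) : Int) := by
    rw [PySem.Int.mod_eq_emod_of_pos (by norm_num)]
    omega
  rw [hfd, hmd, Int.toNat_natCast, PySem.List.pyGetD_natCast, PySem.List.pyGetD_natCast,
    pv_flat_length]
  by_cases hc : k / 8 < l.length
  · rw [if_pos (by exact_mod_cast (by omega : k < 8 * l.length)),
      if_pos (by exact_mod_cast hc)]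
    exact pv_flat_getD l k hc
  · rw [if_neg (by exact_mod_cast (by omega : ¬ k < 8 * l.length)),
      if_neg (by exact_mod_cast hc)]

-- ===== VERDICT (by name: the statement is the Claim_ definition above) =====
theorem bytestr_to_bitstr_spec : Claim_equal_bytestr_to_bitstr := by
  intro bytestr bitstr_width _
  unfold Spec_bytestr_to_bitstr
  -- phase 1: the zero-fill loop builds replicate (8*len) 0
  have hz : (PySem.List.pyRange 0 (8 * (bytestr.length : Int)) 1).foldl
      (fun acc _ => acc ++ [(0 : Int)]) [] = List.replicate (8 * bytestr.length) 0 := by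
    rw [show (fun (acc : List Int) (_ : Int) => acc ++ [(0 : Int)])
          = (fun (acc : List Int) (x : Int) => acc ++ [(fun _ => (0 : Int)) x]) from rfl,
      PySem.List.foldl_append_singleton_eq_map, List.nil_append, List.map_const',
      PySem.List.length_pyRange_one]
    congr 1
    try omega
  -- phase 2: the per-byte loop
  have hst := pv_loop_eq bytestr []
  simp only [List.nil_append, List.length_nil, Nat.cast_zero] at hst
  simp only [bytestr_to_bitstr, bytestr_to_bitstr_alt, hz, hst]
  -- phase 3: both output loops, compared pointwise
  rw [show (fun (acc : List Int) (i : Int) =>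
        if i < (((bytestr.flatMap pvBits8).length : Nat) : Int)
          then acc ++ [PySem.List.pyGetD (bytestr.flatMap pvBits8) i 0] else acc ++ [(0 : Int)])
      = (fun (acc : List Int) (i : Int) => acc ++ [(fun (i : Int) =>
        if i < (((bytestr.flatMap pvBits8).length : Nat) : Int)
          then PySem.List.pyGetD (bytestr.flatMap pvBits8) i 0 else 0) i]) from by
        funext acc i; simp only []; split_ifs <;> rfl,
    show (fun (result : List Int) (i : Int) =>
        if PySem.Int.floordiv i 8 < ((bytestr.length : Nat) : Int)
          then result ++ [PySem.Int.mod
            (PySem.Int.floordiv (PySem.List.pyGetD bytestr (PySem.Int.floordiv i 8) 0)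
              (2 ^ (PySem.Int.mod i 8).toNat)) 2]
          else result ++ [(0 : Int)])
      = (fun (result : List Int) (i : Int) => result ++ [(fun (i : Int) =>
        if PySem.Int.floordiv i 8 < ((bytestr.length : Nat) : Int)
          then PySem.Int.mod
            (PySem.Int.floordiv (PySem.List.pyGetD bytestr (PySem.Int.floordiv i 8) 0)
              (2 ^ (PySem.Int.mod i 8).toNat)) 2
          else 0) i]) from by
        funext result i; simp only []; split_ifs <;> rfl,
    PySem.List.foldl_append_singleton_eq_map, PySem.List.foldl_append_singleton_eq_map,
    List.nil_append, List.nil_append]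
  refine List.map_congr_left ?_
  intro i hi
  obtain ⟨h0, -⟩ := (PySem.List.mem_pyRange_one).1 hi
  rw [← Int.toNat_of_nonneg h0]
  exact pv_point bytestr i.toNat
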